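-- pv_equiv track=rewrite | github.com/HaW-Tagger/HWtagger | tools/images.py | merge_overlapping_tuples
-- ===== SOURCE A (Python) =====
-- from collections import Counter, defaultdict
--
-- def merge_overlapping_tuples(pair_list):
--     # Build adjacency list
--     graph = defaultdict(set)
--     for a, b in pair_list:
--         graph[a].add(b)
--         graph[b].add(a)
--
--     # Perform DFS to find connected components
--     visited = set()
--     merged_groups = []
--
--     def dfs(node, group):
--         stack = [node]
--         while stack:
--             curr = stack.pop()
--             if curr not in visited:
--                 visited.add(curr)
--                 group.add(curr)
--                 stack.extend(graph[curr] - visited)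
--
--     for node in graph:
--         if node not in visited:
--             group = set()
--             dfs(node, group)
--             merged_groups.append(tuple(sorted(group)))
--
--     return merged_groups
-- ===== SOURCE B (Python) =====
-- def merge_overlapping_tuples(pair_list):
--     # Alternative: no adjacency dict and no DFS stack — each component is grown
--     # by repeated absorbing passes over the pair list until a fixpoint.
--     order = list(dict.fromkeys(n for ab in pair_list for n in ab))
--     result = []
--     visited = set()
--     for node in order:
--         if node in visited:
--             continue
--         comp = {node}
--         changed = True
--         while changed:
--             changed = False
--             for a, b in pair_list:
--                 if (a in comp) != (b in comp):
--                     comp.add(a)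
--                     comp.add(b)
--                     changed = True
--         visited |= comp
--         result.append(tuple(sorted(comp)))
--     return result
-- ===== Notes on version B (the rewrite author's own statement) =====
-- stated objective: alternative
-- what changed: Replaces the defaultdict adjacency graph plus explicit-stack DFS with a per-component fixpoint: each component is grown by repeated absorbing passes over the raw pair list until no pair crosses the set, so no graph structure or stack is built.
import Mathlib
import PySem

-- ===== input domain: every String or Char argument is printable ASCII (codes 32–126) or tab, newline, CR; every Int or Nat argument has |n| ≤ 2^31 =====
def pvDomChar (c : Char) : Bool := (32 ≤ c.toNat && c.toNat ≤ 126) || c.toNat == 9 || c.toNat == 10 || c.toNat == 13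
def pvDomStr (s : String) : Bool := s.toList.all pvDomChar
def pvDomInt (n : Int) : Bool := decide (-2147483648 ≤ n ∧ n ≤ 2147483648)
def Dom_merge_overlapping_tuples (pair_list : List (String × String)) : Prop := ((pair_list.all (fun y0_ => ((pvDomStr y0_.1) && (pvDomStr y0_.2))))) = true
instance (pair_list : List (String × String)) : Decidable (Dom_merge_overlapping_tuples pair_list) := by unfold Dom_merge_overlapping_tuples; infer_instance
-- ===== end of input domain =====

-- B replaces A's adjacency-dict + stack-DFS component search by a per-component
-- fixpoint of absorbing passes over the raw pair list (alternative algorithm, same result).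

-- ===== PORT A =====
-- graph = defaultdict(set); for a, b in pair_list: graph[a].add(b); graph[b].add(a)
def pvGraph (pair_list : List (String × String)) : PySem.Dict String (PySem.Set String) :=
  pair_list.foldl (fun g ab =>
    let g1 := g.insert ab.1 (PySem.Set.add (g.getD ab.1 PySem.Set.empty) ab.2)
    g1.insert ab.2 (PySem.Set.add (g1.getD ab.2 PySem.Set.empty) ab.1)) PySem.Dict.empty

-- the stack-DFS while-loop; fuel only makes the recursion structural (proved sufficient below)
def pvDfs (graph : PySem.Dict String (PySem.Set String)) :
    Nat → List String → PySem.Set String → PySem.Set String → PySem.Set String × PySem.Set String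
  | 0, _, visited, group => (visited, group)
  | _ + 1, [], visited, group => (visited, group)
  | fuel + 1, curr :: rest, visited, group =>
    if PySem.Set.contains visited curr then
      pvDfs graph fuel rest visited group
    else
      let visited' := PySem.Set.add visited curr
      let group' := PySem.Set.add group curr
      pvDfs graph fuel
        ((PySem.Set.diff (graph.getD curr PySem.Set.empty) visited').reverse ++ rest)
        visited' group'

def merge_overlapping_tuples (pair_list : List (String × String)) : List (List String) :=
  let graph := pvGraph pair_list
  ((graph.keys).foldl (fun (st : PySem.Set String × List (List String)) node =>
      if PySem.Set.contains st.1 node then st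
      else
        let r := pvDfs graph ((2 * pair_list.length + 1) * (2 * pair_list.length + 1)) [node] st.1 PySem.Set.empty
        (r.1, st.2 ++ [PySem.List.sorted r.2 (fun x => x) false]))
    (PySem.Set.empty, [])).2

-- ===== PORT B =====
-- one absorbing pass: for a, b in pair_list: if (a in comp) != (b in comp): comp.add(a); comp.add(b); changed = True
def pvAbsorb (pair_list : List (String × String)) (st : PySem.Set String × Bool) :
    PySem.Set String × Bool :=
  pair_list.foldl (fun st ab =>
    if (PySem.Set.contains st.1 ab.1) != (PySem.Set.contains st.1 ab.2) then
      (PySem.Set.add (PySem.Set.add st.1 ab.1) ab.2, true)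
    else st) st

-- while changed: …; fuel only makes the recursion structural (proved sufficient below)
def pvClose (pair_list : List (String × String)) : Nat → PySem.Set String → PySem.Set String
  | 0, comp => comp
  | fuel + 1, comp =>
    let r := pvAbsorb pair_list (comp, false)
    if r.2 then pvClose pair_list fuel r.1 else comp

def merge_overlapping_tuples_alt (pair_list : List (String × String)) : List (List String) :=
  let order := PySem.List.dedup (pair_list.flatMap (fun ab => [ab.1, ab.2]))
  (order.foldl (fun (st : PySem.Set String × List (List String)) node =>
      if PySem.Set.contains st.1 node then st
      else
        let comp := pvClose pair_list (2 * pair_list.length + 1)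
          (PySem.Set.add PySem.Set.empty node)
        (PySem.Set.union st.1 comp, st.2 ++ [PySem.List.sorted comp (fun x => x) false]))
    (PySem.Set.empty, [])).2

-- ===== PRECONDITION & SPEC =====
def Spec_merge_overlapping_tuples (pair_list : List (String × String)) (out : List (List String)) : Prop := out = merge_overlapping_tuples_alt pair_list
instance (pair_list : List (String × String)) (out : List (List String)) : Decidable (Spec_merge_overlapping_tuples pair_list out) := by unfold Spec_merge_overlapping_tuples; infer_instance

-- ===== CLAIM (what is proved, stated in full; the proofs are below) =====
def Claim_equal_merge_overlapping_tuples : Prop := ∀ (pair_list : List (String × String)), Dom_merge_overlapping_tuples pair_list → Spec_merge_overlapping_tuples pair_list (merge_overlapping_tuples pair_list)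

-- ===== LEMMAS AND PROOFS =====

-- x and y are the two ends of some pair
def pvAdj (ps : List (String × String)) (x y : String) : Prop := (x, y) ∈ ps ∨ (y, x) ∈ ps

-- connectivity: reflexive-transitive closure of adjacency
def pvConn (ps : List (String × String)) : String → String → Prop :=
  Relation.ReflTransGen (pvAdj ps)

-- all nodes in first-appearance order (a before b within a pair)
def pvNodes (ps : List (String × String)) : List String :=
  PySem.List.dedup (ps.flatMap (fun ab => [ab.1, ab.2]))

-- v is closed under adjacency
def pvClosed (ps : List (String × String)) (v : List String) : Prop :=
  ∀ x ∈ v, ∀ y, pvAdj ps x y → y ∈ v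

theorem pvConn_symm {ps : List (String × String)} {x y : String}
    (h : pvConn ps x y) : pvConn ps y x :=
  Relation.ReflTransGen.symmetric (fun _ _ hxy => hxy.symm) h

theorem pvNodes_nodup (ps : List (String × String)) : (pvNodes ps).Nodup := by
  rw [pvNodes, PySem.List.dedup_eq_ofList]; exact PySem.Set.nodup_ofList _

theorem mem_pvNodes {ps : List (String × String)} {x : String} :
    x ∈ pvNodes ps ↔ ∃ ab ∈ ps, x = ab.1 ∨ x = ab.2 := by
  rw [pvNodes, PySem.List.dedup_eq_ofList]
  rw [PySem.Set.mem_ofList]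
  simp [List.mem_flatMap]

theorem pvAdj_mem_nodes {ps : List (String × String)} {x y : String} (h : pvAdj ps x y) :
    x ∈ pvNodes ps ∧ y ∈ pvNodes ps := by
  rcases h with h | h
  · exact ⟨mem_pvNodes.mpr ⟨(x, y), h, Or.inl rfl⟩, mem_pvNodes.mpr ⟨(x, y), h, Or.inr rfl⟩⟩
  · exact ⟨mem_pvNodes.mpr ⟨(y, x), h, Or.inr rfl⟩, mem_pvNodes.mpr ⟨(y, x), h, Or.inl rfl⟩⟩

theorem pvNodes_length (ps : List (String × String)) :
    (pvNodes ps).length ≤ 2 * ps.length := by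
  have h1 : (pvNodes ps).length ≤ (ps.flatMap (fun ab => [ab.1, ab.2])).length := by
    rw [pvNodes, PySem.List.dedup_eq_ofList]; exact PySem.Set.length_ofList_le _
  have h2 : (ps.flatMap (fun ab => [ab.1, ab.2])).length = 2 * ps.length := by
    clear h1
    induction ps with
    | nil => simp
    | cons a l ih =>
      simp only [List.flatMap_cons, List.length_append, List.length_cons, ih]
      simp; omega
  omega

theorem pvClosed_conn {ps : List (String × String)} {v : List String} {x y : String}
    (hc : pvClosed ps v) (hx : x ∈ v) (h : pvConn ps x y) : y ∈ v := by
  induction h with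
  | refl => exact hx
  | tail _ hadj ih => exact hc _ ih _ hadj

-- subset of a list, counted without duplicates
theorem pv_nodup_subset_length {l l' : List String} (h : l.Nodup) (hs : ∀ x ∈ l, x ∈ l') :
    l.length ≤ l'.length :=
  (List.subperm_of_subset h hs).length_le

-- removing a present element from the unvisited filter
theorem pv_filter_add_length {v : List String} {c : String} (hv : c ∉ v)
    {l : List String} (hnd : l.Nodup) (hc : c ∈ l) :
    (l.filter (fun k => decide (k ∉ PySem.Set.add v c))).length + 1 =
      (l.filter (fun k => decide (k ∉ v))).length := by
  have h1 : l.filter (fun k => decide (k ∉ PySem.Set.add v c)) =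
      (l.filter (fun k => decide (k ∉ v))).filter (fun k => decide ¬(k = c)) := by
    rw [List.filter_filter]
    apply List.filter_congr
    intro x _
    by_cases h1 : x ∈ v <;> by_cases h2 : x = c <;>
      simp [PySem.Set.mem_add, h1, h2]
  have hcf : c ∈ l.filter (fun k => decide (k ∉ v)) := by
    simp [List.mem_filter, hc, hv]
  have hndf : (l.filter (fun k => decide (k ∉ v))).Nodup := hnd.filter _
  rw [h1]
  have he : (l.filter (fun k => decide (k ∉ v))).filter (fun k => decide ¬(k = c)) =
      (l.filter (fun k => decide (k ∉ v))).erase c := by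
    rw [List.Nodup.erase_eq_filter hndf]
    apply List.filter_congr; intro x _; by_cases h : x = c <;> simp [h, bne]
  rw [he, List.length_erase_of_mem hcf]
  have : 0 < (l.filter (fun k => decide (k ∉ v))).length := List.length_pos_of_mem hcf
  omega

-- ---------- graph lemmas (port A) ----------

theorem pvGraph_step (ps : List (String × String)) (ab : String × String) :
    pvGraph (ps ++ [ab]) =
      ((pvGraph ps).insert ab.1
          (PySem.Set.add ((pvGraph ps).getD ab.1 PySem.Set.empty) ab.2)).insert ab.2
        (PySem.Set.add
          (((pvGraph ps).insert ab.1
              (PySem.Set.add ((pvGraph ps).getD ab.1 PySem.Set.empty) ab.2)).getD ab.2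
            PySem.Set.empty) ab.1) := by
  simp [pvGraph, List.foldl_append]

theorem pvAdj_append_singleton {ps : List (String × String)} {ab : String × String}
    {x y : String} :
    pvAdj (ps ++ [ab]) x y ↔ pvAdj ps x y ∨ (x = ab.1 ∧ y = ab.2) ∨ (x = ab.2 ∧ y = ab.1) := by
  simp [pvAdj, List.mem_append, Prod.ext_iff]
  tauto

theorem pvGraph_getD_mem {ps : List (String × String)} {x y : String} :
    y ∈ (pvGraph ps).getD x PySem.Set.empty ↔ pvAdj ps x y := by
  induction ps using List.reverseRecOn generalizing x y with
  | nil => simp [pvGraph, PySem.Dict.getD_empty, pvAdj, PySem.Set.empty]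
  | append_singleton ps ab ih =>
    rw [pvGraph_step, pvAdj_append_singleton]
    rw [PySem.Dict.getD_insert, PySem.Dict.getD_insert, PySem.Dict.getD_insert]
    have ih' : ∀ x' y', y' ∈ (pvGraph ps).getD x' ([] : PySem.Set String) ↔ pvAdj ps x' y' :=
      fun _ _ => ih
    by_cases hxb : x = ab.2 <;> by_cases hxa : x = ab.1 <;>
      by_cases hba : ab.2 = ab.1 <;>
      (try have hba' : ¬ ab.1 = ab.2 := fun h => hba h.symm) <;>
      simp_all [PySem.Set.mem_add]

theorem pvGraph_getD_nodup (ps : List (String × String)) (x : String) :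
    ((pvGraph ps).getD x PySem.Set.empty).Nodup := by
  induction ps using List.reverseRecOn generalizing x with
  | nil => simp [pvGraph, PySem.Dict.getD_empty, PySem.Set.empty]
  | append_singleton ps ab ih =>
    rw [pvGraph_step]
    rw [PySem.Dict.getD_insert, PySem.Dict.getD_insert, PySem.Dict.getD_insert]
    have ih' : ∀ x', ((pvGraph ps).getD x' ([] : PySem.Set String)).Nodup := fun _ => ih _
    by_cases hxb : x = ab.2 <;> by_cases hxa : x = ab.1 <;>
      by_cases hba : ab.2 = ab.1 <;>
      (try have hba' : ¬ ab.1 = ab.2 := fun h => hba h.symm) <;>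
      simp_all [] <;>
      first
        | exact PySem.Set.nodup_add _ _ (PySem.Set.nodup_add _ _ (ih' _))
        | exact PySem.Set.nodup_add _ _ (ih' _)

theorem pvGraph_keys (ps : List (String × String)) : (pvGraph ps).keys = pvNodes ps := by
  have hnodes : ∀ (l : List (String × String)) (s : PySem.Set String),
      (l.flatMap (fun ab => [ab.1, ab.2])).foldl PySem.Set.add s =
        l.foldl (fun s ab => PySem.Set.add (PySem.Set.add s ab.1) ab.2) s := by
    intro l
    induction l with
    | nil => intro s; rfl
    | cons hd tl ih => intro s; simp only [List.flatMap_cons, List.foldl_append,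
        List.foldl_cons, List.foldl_nil, ih]
  have hkeys : ∀ (l : List (String × String)),
      (pvGraph l).keys = l.foldl (fun s ab => PySem.Set.add (PySem.Set.add s ab.1) ab.2) [] ∧
      (pvGraph l).keys.Nodup := by
    intro l
    induction l using List.reverseRecOn with
    | nil => exact ⟨rfl, PySem.Dict.nodup_keys_empty⟩
    | append_singleton l ab ih =>
      obtain ⟨ihk, ihn⟩ := ih
      have haddkeys : ∀ (d : PySem.Dict String (PySem.Set String)) (k : String)
          (v : PySem.Set String), d.keys.Nodup →
          (d.insert k v).keys = PySem.Set.add d.keys k ∧ (d.insert k v).keys.Nodup := by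
        intro d k v hnd
        by_cases hk : d.contains k = true
        · rw [PySem.Dict.keys_insert_of_contains d v hk]
          have : k ∈ d.keys := (PySem.Dict.contains_iff_mem_keys d k).mp hk
          rw [PySem.Set.add_of_mem this]
          exact ⟨rfl, hnd⟩
        · have hk' : d.contains k = false := by
            cases h : d.contains k
            · rfl
            · exact absurd h hk
          rw [PySem.Dict.keys_insert_of_not_contains d v hk']
          have : k ∉ d.keys := fun hm => by
            rw [(PySem.Dict.contains_iff_mem_keys d k).mpr hm] at hk'
            simp at hk'
          rw [← PySem.Set.add_of_not_mem this]
          exact ⟨rfl, PySem.Set.nodup_add _ _ hnd⟩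
      rw [pvGraph_step]
      obtain ⟨h1, h1n⟩ := haddkeys (pvGraph l) ab.1 _ ihn
      obtain ⟨h2, h2n⟩ := haddkeys _ ab.2 _ h1n
      refine ⟨?_, h2n⟩
      rw [h2, h1, ihk, List.foldl_append]
      rfl
  rw [(hkeys ps).1, pvNodes, PySem.List.dedup_eq_ofList, PySem.Set.ofList_eq_foldl, hnodes]

theorem pvGraph_getD_length {ps : List (String × String)} (x : String) :
    ((pvGraph ps).getD x PySem.Set.empty).length ≤ 2 * ps.length := by
  calc ((pvGraph ps).getD x PySem.Set.empty).length ≤ (pvNodes ps).length := by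
        apply pv_nodup_subset_length (pvGraph_getD_nodup ps x)
        intro z hz
        exact (pvAdj_mem_nodes (pvGraph_getD_mem.mp hz)).2
    _ ≤ 2 * ps.length := pvNodes_length ps

-- ---------- DFS lemmas (port A) ----------

theorem pvConn_mem_nodes {ps : List (String × String)} {r y : String}
    (hr : r ∈ pvNodes ps) (h : pvConn ps r y) : y ∈ pvNodes ps := by
  induction h with
  | refl => exact hr
  | tail _ hadj _ => exact (pvAdj_mem_nodes hadj).2

theorem pv_diff_length (s t : PySem.Set String) : (PySem.Set.diff s t).length ≤ s.length := by
  have : (PySem.Set.diff s t).Sublist s := by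
    have h := PySem.Set.mem_diff s t
    -- diff keeps a subsequence of s: prove via the definition
    induction s with
    | nil => simp [PySem.Set.diff]
    | cons a u ih =>
      by_cases ha : PySem.Set.contains t a = true <;>
        simp [PySem.Set.diff, List.filter_cons] at * <;>
        simp_all
  exact this.length_le

theorem pvDfs_spec (ps : List (String × String)) (V0 : List String) (r : String)
    (hV0c : pvClosed ps V0) (hr : r ∉ V0) (hrn : r ∈ pvNodes ps) :
    ∀ fuel stack visited group,
      visited.Nodup → group.Nodup →
      (∀ y, y ∈ group ↔ (y ∈ visited ∧ y ∉ V0)) →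
      (∀ y ∈ V0, y ∈ visited) →
      (∀ y ∈ stack, pvConn ps r y) →
      (∀ y ∈ group, pvConn ps r y) →
      (∀ x ∈ group, ∀ y, pvAdj ps x y → y ∈ visited ∨ y ∈ stack) →
      (r ∈ group ∨ r ∈ stack) →
      stack.length + ((pvGraph ps).keys.filter
          (fun k => decide (k ∉ visited))).length * (2 * ps.length + 1) ≤ fuel →
      (∀ y, y ∈ (pvDfs (pvGraph ps) fuel stack visited group).2 ↔ pvConn ps r y) ∧
      (∀ y, y ∈ (pvDfs (pvGraph ps) fuel stack visited group).1 ↔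
          (y ∈ V0 ∨ y ∈ (pvDfs (pvGraph ps) fuel stack visited group).2)) ∧
      (pvDfs (pvGraph ps) fuel stack visited group).1.Nodup ∧
      (pvDfs (pvGraph ps) fuel stack visited group).2.Nodup := by
  have final : ∀ visited group : PySem.Set String,
      visited.Nodup → group.Nodup →
      (∀ y, y ∈ group ↔ (y ∈ visited ∧ y ∉ V0)) →
      (∀ y ∈ V0, y ∈ visited) →
      (∀ y ∈ group, pvConn ps r y) →
      (∀ x ∈ group, ∀ y, pvAdj ps x y → y ∈ visited ∨ y ∈ ([] : List String)) →
      (r ∈ group) →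
      (∀ y, y ∈ group ↔ pvConn ps r y) ∧
      (∀ y, y ∈ visited ↔ (y ∈ V0 ∨ y ∈ group)) ∧
      visited.Nodup ∧ group.Nodup := by
    intro visited group hvn hgn hgv hV0v hgc hcl hrg
    have hmem : ∀ y, y ∈ group ↔ pvConn ps r y := by
      intro y
      refine ⟨hgc y, ?_⟩
      intro hconn
      induction hconn with
      | refl => exact hrg
      | @tail b c hxy hadj ih =>
        rcases hcl b ih c hadj with hv | he
        · have hcV0 : c ∉ V0 := by
            intro hy0
            exact hr (pvClosed_conn hV0c hy0 (pvConn_symm (hxy.tail hadj)))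
          exact (hgv c).mpr ⟨hv, hcV0⟩
        · exact absurd he (List.not_mem_nil)
    refine ⟨hmem, ?_, hvn, hgn⟩
    intro y
    constructor
    · intro hyv
      by_cases hy0 : y ∈ V0
      · exact Or.inl hy0
      · exact Or.inr ((hgv y).mpr ⟨hyv, hy0⟩)
    · rintro (hy0 | hyg)
      · exact hV0v y hy0
      · exact ((hgv y).mp hyg).1
  intro fuel
  induction fuel with
  | zero =>
    intro stack visited group hvn hgn hgv hV0v hsc hgc hcl hrg hbound
    have hst : stack = [] := by
      cases stack with
      | nil => rfl
      | cons a t => simp at hbound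
    subst hst
    have := final visited group hvn hgn hgv hV0v hgc (by
      intro x hx y hadj
      exact hcl x hx y hadj) (by
      rcases hrg with h | h
      · exact h
      · exact absurd h (List.not_mem_nil))
    simpa [pvDfs] using this
  | succ fuel ih =>
    intro stack visited group hvn hgn hgv hV0v hsc hgc hcl hrg hbound
    cases stack with
    | nil =>
      have := final visited group hvn hgn hgv hV0v hgc (by
        intro x hx y hadj
        exact hcl x hx y hadj) (by
        rcases hrg with h | h
        · exact h
        · exact absurd h (List.not_mem_nil))
      simpa [pvDfs] using this
    | cons curr rest =>
      by_cases hvc : curr ∈ visited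
      · have hct : PySem.Set.contains visited curr = true :=
          (PySem.Set.contains_iff visited curr).mpr hvc
        have hunfold : pvDfs (pvGraph ps) (fuel + 1) (curr :: rest) visited group =
            pvDfs (pvGraph ps) fuel rest visited group := by
          simp only [pvDfs, hct, if_pos]
        rw [hunfold]
        apply ih rest visited group hvn hgn hgv hV0v
          (fun y hy => hsc y (List.mem_cons_of_mem _ hy)) hgc
        · intro x hx y hadj
          rcases hcl x hx y hadj with hv | he
          · exact Or.inl hv
          · rcases List.mem_cons.mp he with rfl | ht
            · exact Or.inl hvc
            · exact Or.inr ht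
        · rcases hrg with h | h
          · exact Or.inl h
          · rcases List.mem_cons.mp h with rfl | ht
            · exact Or.inl ((hgv r).mpr ⟨hvc, hr⟩)
            · exact Or.inr ht
        · simp only [List.length_cons] at hbound
          omega
      · have hct : PySem.Set.contains visited curr = false := by
          cases h : PySem.Set.contains visited curr
          · rfl
          · exact absurd ((PySem.Set.contains_iff visited curr).mp h) hvc
        have hcurrconn : pvConn ps r curr := hsc curr (List.mem_cons_self)
        have hcurrV0 : curr ∉ V0 := by
          intro h0
          exact hr (pvClosed_conn hV0c h0 (pvConn_symm hcurrconn))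
        have hcurrnode : curr ∈ pvNodes ps := pvConn_mem_nodes hrn hcurrconn
        set visited' := PySem.Set.add visited curr with hv'
        set group' := PySem.Set.add group curr with hg'
        set stack' := (PySem.Set.diff ((pvGraph ps).getD curr PySem.Set.empty)
            visited').reverse ++ rest with hs'
        have hunfold : pvDfs (pvGraph ps) (fuel + 1) (curr :: rest) visited group =
            pvDfs (pvGraph ps) fuel stack' visited' group' := by
          simp only [pvDfs, hct]
          rfl
        rw [hunfold]
        have hstackmem : ∀ y, y ∈ stack' ↔
            (y ∈ (pvGraph ps).getD curr PySem.Set.empty ∧ y ∉ visited') ∨ y ∈ rest := by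
          intro y
          simp [hs', PySem.Set.mem_diff]
        apply ih stack' visited' group'
          (PySem.Set.nodup_add _ _ hvn) (PySem.Set.nodup_add _ _ hgn)
        · intro y
          rw [hg', PySem.Set.mem_add, hv', PySem.Set.mem_add, hgv y]
          constructor
          · rintro (⟨hyv, hy0⟩ | rfl)
            · exact ⟨Or.inl hyv, hy0⟩
            · exact ⟨Or.inr rfl, hcurrV0⟩
          · rintro ⟨hyv | rfl, hy0⟩
            · exact Or.inl ⟨hyv, hy0⟩
            · exact Or.inr rfl
        · intro y hy
          exact (PySem.Set.mem_add visited curr y).mpr (Or.inl (hV0v y hy))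
        · intro y hy
          rcases (hstackmem y).mp hy with ⟨hyg, _⟩ | hyr
          · exact hcurrconn.tail (pvGraph_getD_mem.mp hyg)
          · exact hsc y (List.mem_cons_of_mem _ hyr)
        · intro y hy
          rcases (PySem.Set.mem_add group curr y).mp hy with hyg | heq
          · exact hgc y hyg
          · exact heq ▸ hcurrconn
        · intro x hx y hadj
          rcases (PySem.Set.mem_add group curr x).mp hx with hxg | heqx
          · rcases hcl x hxg y hadj with hv | he
            · exact Or.inl ((PySem.Set.mem_add visited curr y).mpr (Or.inl hv))
            · rcases List.mem_cons.mp he with heq | ht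
              · exact Or.inl ((PySem.Set.mem_add visited curr y).mpr (Or.inr heq))
              · exact Or.inr ((hstackmem y).mpr (Or.inr ht))
          · have hyg : y ∈ (pvGraph ps).getD curr PySem.Set.empty :=
              pvGraph_getD_mem.mpr (heqx ▸ hadj)
            by_cases hyv : y ∈ visited'
            · exact Or.inl hyv
            · exact Or.inr ((hstackmem y).mpr (Or.inl ⟨hyg, hyv⟩))
        · rcases hrg with h | h
          · exact Or.inl ((PySem.Set.mem_add group curr r).mpr (Or.inl h))
          · rcases List.mem_cons.mp h with heq | ht
            · exact Or.inl ((PySem.Set.mem_add group curr r).mpr (Or.inr heq))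
            · exact Or.inr ((hstackmem r).mpr (Or.inr ht))
        · -- fuel accounting
          have hkeysnd : (pvGraph ps).keys.Nodup := by
            rw [pvGraph_keys]; exact pvNodes_nodup ps
          have hcurrkey : curr ∈ (pvGraph ps).keys := by
            rw [pvGraph_keys]; exact hcurrnode
          have hfilter := pv_filter_add_length hvc hkeysnd hcurrkey
          have hstlen : stack'.length ≤ 2 * ps.length + rest.length := by
            have h1 : stack'.length =
                (PySem.Set.diff ((pvGraph ps).getD curr PySem.Set.empty) visited').length +
                  rest.length := by
              simp [hs']
            have h2 := pv_diff_length ((pvGraph ps).getD curr PySem.Set.empty) visited'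
            have h3 := pvGraph_getD_length (ps := ps) curr
            omega
          simp only [List.length_cons] at hbound
          rw [hv']
          have hK : (List.filter (fun k => decide (k ∉ PySem.Set.add visited curr))
                (pvGraph ps).keys).length * (2 * ps.length + 1) + (2 * ps.length + 1) =
              (List.filter (fun k => decide (k ∉ visited))
                (pvGraph ps).keys).length * (2 * ps.length + 1) := by
            rw [← hfilter]; ring
          omega

-- ---------- closure lemmas (port B) ----------

def pvConnFrom (ps : List (String × String)) (c : List String) (y : String) : Prop :=
  ∃ x ∈ c, pvConn ps x y

theorem pv_cross_iff (c : PySem.Set String) (a b : String) :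
    ((PySem.Set.contains c a) != (PySem.Set.contains c b)) = true ↔ ¬(a ∈ c ↔ b ∈ c) := by
  have ha := PySem.Set.contains_iff c a
  have hb := PySem.Set.contains_iff c b
  cases hca : PySem.Set.contains c a <;> cases hcb : PySem.Set.contains c b <;>
    rw [hca] at ha <;> rw [hcb] at hb <;> simp_all

theorem pv_add_prefix (s : PySem.Set String) (x : String) : s <+: PySem.Set.add s x := by
  rw [PySem.Set.add_eq_ite]
  split
  · exact List.prefix_refl s
  · exact List.prefix_append s [x]

theorem pv_add_length (s : PySem.Set String) (x : String) :
    s.length ≤ (PySem.Set.add s x).length := (pv_add_prefix s x).length_le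

theorem pvAbsorb_prefix : ∀ (l : List (String × String)) (st : PySem.Set String × Bool),
    st.1 <+: (pvAbsorb l st).1 := by
  intro l
  induction l with
  | nil => intro st; exact List.prefix_refl _
  | cons ab t ih =>
    intro st
    show st.1 <+: (pvAbsorb t _).1
    by_cases hcr : ((PySem.Set.contains st.1 ab.1) != (PySem.Set.contains st.1 ab.2)) = true
    · simp only [pvAbsorb, if_pos hcr]
      refine List.IsPrefix.trans ?_ (ih _)
      exact (pv_add_prefix st.1 ab.1).trans (pv_add_prefix _ ab.2)
    · simp only [pvAbsorb, if_neg hcr]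
      exact ih st

theorem pvAbsorb_nodup : ∀ (l : List (String × String)) (st : PySem.Set String × Bool),
    st.1.Nodup → (pvAbsorb l st).1.Nodup := by
  intro l
  induction l with
  | nil => intro st h; exact h
  | cons ab t ih =>
    intro st h
    by_cases hcr : ((PySem.Set.contains st.1 ab.1) != (PySem.Set.contains st.1 ab.2)) = true
    · simp only [pvAbsorb, List.foldl_cons, if_pos hcr]
      exact ih _ (PySem.Set.nodup_add _ _ (PySem.Set.nodup_add _ _ h))
    · simp only [pvAbsorb, List.foldl_cons, if_neg hcr]
      exact ih st h

theorem pvAbsorb_sound (ps : List (String × String)) (c : List String) :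
    ∀ (l : List (String × String)) (st : PySem.Set String × Bool),
      (∀ ab ∈ l, ab ∈ ps) → (∀ y ∈ st.1, pvConnFrom ps c y) →
      ∀ y ∈ (pvAbsorb l st).1, pvConnFrom ps c y := by
  intro l
  induction l with
  | nil => intro st _ h; exact h
  | cons ab t ih =>
    intro st hsub h
    have hab : ab ∈ ps := hsub ab (List.mem_cons_self)
    have hsub' : ∀ p ∈ t, p ∈ ps := fun p hp => hsub p (List.mem_cons_of_mem _ hp)
    by_cases hcr : ((PySem.Set.contains st.1 ab.1) != (PySem.Set.contains st.1 ab.2)) = true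
    · simp only [pvAbsorb, List.foldl_cons, if_pos hcr]
      apply ih _ hsub'
      intro y hy
      rcases (PySem.Set.mem_add _ _ _).mp hy with hy | rfl
      · rcases (PySem.Set.mem_add _ _ _).mp hy with hy | rfl
        · exact h y hy
        · -- y = ab.1
          rcases (pv_cross_iff st.1 ab.1 ab.2).mp hcr |> fun hne => Classical.em (ab.1 ∈ st.1) with h1 | h1
          · exact h _ h1
          · -- ab.1 ∉ st.1, so ab.2 ∈ st.1 (the pair crosses)
            have hne := (pv_cross_iff st.1 ab.1 ab.2).mp hcr
            have h2 : ab.2 ∈ st.1 := by tauto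
            obtain ⟨x, hx, hconn⟩ := h _ h2
            exact ⟨x, hx, hconn.trans (Relation.ReflTransGen.single (Or.inr hab))⟩
      · -- y = ab.2
        by_cases h2 : ab.2 ∈ st.1
        · exact h _ h2
        · have hne := (pv_cross_iff st.1 ab.1 ab.2).mp hcr
          have h1 : ab.1 ∈ st.1 := by tauto
          obtain ⟨x, hx, hconn⟩ := h _ h1
          exact ⟨x, hx, hconn.trans (Relation.ReflTransGen.single (Or.inl hab))⟩
    · simp only [pvAbsorb, List.foldl_cons, if_neg hcr]
      exact ih st hsub' h

theorem pvAbsorb_nodes (ps : List (String × String)) :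
    ∀ (l : List (String × String)) (st : PySem.Set String × Bool),
      (∀ ab ∈ l, ab ∈ ps) → (∀ y ∈ st.1, y ∈ pvNodes ps) →
      ∀ y ∈ (pvAbsorb l st).1, y ∈ pvNodes ps := by
  intro l
  induction l with
  | nil => intro st _ h; exact h
  | cons ab t ih =>
    intro st hsub h
    have hab : ab ∈ ps := hsub ab (List.mem_cons_self)
    have hsub' : ∀ p ∈ t, p ∈ ps := fun p hp => hsub p (List.mem_cons_of_mem _ hp)
    by_cases hcr : ((PySem.Set.contains st.1 ab.1) != (PySem.Set.contains st.1 ab.2)) = true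
    · simp only [pvAbsorb, List.foldl_cons, if_pos hcr]
      apply ih _ hsub'
      intro y hy
      rcases (PySem.Set.mem_add _ _ _).mp hy with hy | rfl
      · rcases (PySem.Set.mem_add _ _ _).mp hy with hy | rfl
        · exact h y hy
        · exact (pvAdj_mem_nodes (Or.inl hab)).1
      · exact (pvAdj_mem_nodes (Or.inl hab)).2
    · simp only [pvAbsorb, List.foldl_cons, if_neg hcr]
      exact ih st hsub' h

theorem pvAbsorb_flag_mono : ∀ (l : List (String × String)) (st : PySem.Set String × Bool),
    st.2 = true → (pvAbsorb l st).2 = true := by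
  intro l
  induction l with
  | nil => intro st h; exact h
  | cons ab t ih =>
    intro st h
    by_cases hcr : ((PySem.Set.contains st.1 ab.1) != (PySem.Set.contains st.1 ab.2)) = true
    · simp only [pvAbsorb, List.foldl_cons, if_pos hcr]
      exact ih _ rfl
    · simp only [pvAbsorb, List.foldl_cons, if_neg hcr]
      exact ih st h

theorem pvAbsorb_false : ∀ (l : List (String × String)) (st : PySem.Set String × Bool),
    (pvAbsorb l st).2 = false →
    (pvAbsorb l st).1 = st.1 ∧ ∀ ab ∈ l, (ab.1 ∈ st.1 ↔ ab.2 ∈ st.1) := by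
  intro l
  induction l with
  | nil => intro st _; exact ⟨rfl, by simp⟩
  | cons ab t ih =>
    intro st hf
    by_cases hcr : ((PySem.Set.contains st.1 ab.1) != (PySem.Set.contains st.1 ab.2)) = true
    · exfalso
      have : (pvAbsorb (ab :: t) st).2 = true := by
        simp only [pvAbsorb, List.foldl_cons, if_pos hcr]
        exact pvAbsorb_flag_mono t _ rfl
      rw [this] at hf; cases hf
    · have hstep : pvAbsorb (ab :: t) st = pvAbsorb t st := by
        simp only [pvAbsorb, List.foldl_cons, if_neg hcr]
      rw [hstep] at hf
      obtain ⟨h1, h2⟩ := ih st hf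
      refine ⟨by rw [hstep, h1], ?_⟩
      intro p hp
      rcases List.mem_cons.mp hp with rfl | hp
      · have := (pv_cross_iff st.1 p.1 p.2)
        tauto
      · exact h2 p hp

theorem pvAbsorb_grow : ∀ (l : List (String × String)) (st : PySem.Set String × Bool),
    st.2 = false → (pvAbsorb l st).2 = true →
    st.1.length < (pvAbsorb l st).1.length := by
  intro l
  induction l with
  | nil => intro st h1 h2; rw [pvAbsorb] at h2; simp at h2; rw [h1] at h2; cases h2
  | cons ab t ih =>
    intro st h1 h2
    by_cases hcr : ((PySem.Set.contains st.1 ab.1) != (PySem.Set.contains st.1 ab.2)) = true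
    · have hstep : pvAbsorb (ab :: t) st =
          pvAbsorb t (PySem.Set.add (PySem.Set.add st.1 ab.1) ab.2, true) := by
        simp only [pvAbsorb, List.foldl_cons, if_pos hcr]
      rw [hstep]
      have hne := (pv_cross_iff st.1 ab.1 ab.2).mp hcr
      have hgrow : st.1.length < (PySem.Set.add (PySem.Set.add st.1 ab.1) ab.2).length := by
        by_cases h1m : ab.1 ∈ st.1
        · have h2m : ab.2 ∉ st.1 := by tauto
          have h2m' : ab.2 ∉ PySem.Set.add st.1 ab.1 := by
            rw [PySem.Set.add_of_mem h1m]; exact h2m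
          rw [PySem.Set.add_of_mem h1m, PySem.Set.add_of_not_mem h2m]
          simp
        · rw [PySem.Set.add_of_not_mem h1m]
          calc st.1.length < (st.1 ++ [ab.1]).length := by simp
            _ ≤ (PySem.Set.add (st.1 ++ [ab.1]) ab.2).length := pv_add_length _ _
      have hrest : (PySem.Set.add (PySem.Set.add st.1 ab.1) ab.2).length ≤
          (pvAbsorb t (PySem.Set.add (PySem.Set.add st.1 ab.1) ab.2, true)).1.length :=
        (pvAbsorb_prefix t (PySem.Set.add (PySem.Set.add st.1 ab.1) ab.2, true)).length_le
      omega
    · have hstep : pvAbsorb (ab :: t) st = pvAbsorb t st := by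
        simp only [pvAbsorb, List.foldl_cons, if_neg hcr]
      rw [hstep] at h2 ⊢
      exact ih st h1 h2

theorem pvClose_spec (ps : List (String × String)) :
    ∀ fuel (c : List String), c.Nodup → (∀ y ∈ c, y ∈ pvNodes ps) →
      (pvNodes ps).length + 1 ≤ fuel + c.length →
      (∀ y ∈ c, y ∈ pvClose ps fuel c) ∧
      (∀ y ∈ pvClose ps fuel c, pvConnFrom ps c y) ∧
      pvClosed ps (pvClose ps fuel c) ∧
      (pvClose ps fuel c).Nodup ∧
      (∀ y ∈ pvClose ps fuel c, y ∈ pvNodes ps) := by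
  intro fuel
  induction fuel with
  | zero =>
    intro c hnd hsub hbound
    exfalso
    have := pv_nodup_subset_length hnd hsub
    omega
  | succ n ih =>
    intro c hnd hsub hbound
    have hunfold : pvClose ps (n + 1) c =
        if (pvAbsorb ps (c, false)).2 then pvClose ps n (pvAbsorb ps (c, false)).1 else c := by
      simp only [pvClose]
    cases hr : (pvAbsorb ps (c, false)).2 with
    | false =>
      rw [hunfold, hr, if_neg (by simp)]
      obtain ⟨heq, hcross⟩ := pvAbsorb_false ps (c, false) hr
      refine ⟨fun y hy => hy, fun y hy => ⟨y, hy, Relation.ReflTransGen.refl⟩, ?_, hnd, hsub⟩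
      intro x hx y hadj
      rcases hadj with hmem | hmem
      · exact (hcross _ hmem).mp hx
      · exact (hcross _ hmem).mpr hx
    | true =>
      rw [hunfold, hr, if_pos rfl]
      have hpre : c <+: (pvAbsorb ps (c, false)).1 := pvAbsorb_prefix ps (c, false)
      have hnd' : (pvAbsorb ps (c, false)).1.Nodup := pvAbsorb_nodup ps (c, false) hnd
      have hsub' : ∀ y ∈ (pvAbsorb ps (c, false)).1, y ∈ pvNodes ps :=
        pvAbsorb_nodes ps ps (c, false) (fun _ h => h) hsub
      have hgrow : c.length < (pvAbsorb ps (c, false)).1.length :=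
        pvAbsorb_grow ps (c, false) rfl hr
      have hsound : ∀ y ∈ (pvAbsorb ps (c, false)).1, pvConnFrom ps c y :=
        pvAbsorb_sound ps c ps (c, false) (fun _ h => h)
          (fun y hy => ⟨y, hy, Relation.ReflTransGen.refl⟩)
      obtain ⟨ih1, ih2, ih3, ih4, ih5⟩ := ih (pvAbsorb ps (c, false)).1 hnd' hsub' (by omega)
      refine ⟨fun y hy => ih1 y (hpre.subset hy), ?_, ih3, ih4, ih5⟩
      intro y hy
      obtain ⟨x, hx, hconn⟩ := ih2 y hy
      obtain ⟨w, hw, hconn'⟩ := hsound x hx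
      exact ⟨w, hw, hconn'.trans hconn⟩

theorem pvClose_comp (ps : List (String × String)) (node : String)
    (hnode : node ∈ pvNodes ps) :
    (∀ y, y ∈ pvClose ps (2 * ps.length + 1) (PySem.Set.add PySem.Set.empty node) ↔
        pvConn ps node y) ∧
    (pvClose ps (2 * ps.length + 1) (PySem.Set.add PySem.Set.empty node)).Nodup := by
  have hc0 : PySem.Set.add PySem.Set.empty node = [node] :=
    PySem.Set.add_of_not_mem (by simp [PySem.Set.empty])
  rw [hc0]
  have hbound : (pvNodes ps).length + 1 ≤ (2 * ps.length + 1) + ([node] : List String).length := by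
    have := pvNodes_length ps
    simp only [List.length_cons, List.length_nil]
    omega
  obtain ⟨h1, h2, h3, h4, _⟩ := pvClose_spec ps (2 * ps.length + 1) [node]
    (List.nodup_cons.mpr ⟨List.not_mem_nil, List.nodup_nil⟩)
    (by intro y hy; rcases List.mem_singleton.mp hy with rfl; exact hnode) hbound
  refine ⟨fun y => ⟨?_, ?_⟩, h4⟩
  · intro hy
    obtain ⟨x, hx, hconn⟩ := h2 y hy
    rcases List.mem_singleton.mp hx with rfl
    exact hconn
  · intro hconn
    exact pvClosed_conn h3 (h1 node (List.mem_singleton.mpr rfl)) hconn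

-- ---------- sorted equality ----------

theorem pv_sorted_eq_of_same_mem {g1 g2 : List String} (h1 : g1.Nodup) (h2 : g2.Nodup)
    (hm : ∀ y, y ∈ g1 ↔ y ∈ g2) :
    PySem.List.sorted g1 (fun x => x) false = PySem.List.sorted g2 (fun x => x) false := by
  have hperm : g2.Perm g1 := (List.perm_ext_iff_of_nodup h2 h1).mpr (fun a => (hm a).symm)
  have hys : (PySem.List.sorted g2 (fun x => x) false).Perm g2 :=
    PySem.List.sorted_perm g2 (fun x => x) false
  have hnd : (PySem.List.sorted g2 (fun x => x) false).Nodup := hys.symm.nodup h2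
  have hle : (PySem.List.sorted g2 (fun x => x) false).Pairwise (fun a b => a ≤ b) :=
    PySem.List.sorted_pairwise g2 (fun x => x)
  have hlt : (PySem.List.sorted g2 (fun x => x) false).Pairwise (fun a b => a < b) := by
    have := hle.and hnd
    exact this.imp (fun h => lt_of_le_of_ne h.1 h.2)
  exact PySem.List.sorted_eq_of_perm_of_pairwise_lt g1 _ (fun x => x) (hys.trans hperm) hlt

-- ---------- outer loop ----------

theorem pv_outer (ps : List (String × String)) :
    ∀ (l : List String) (vA vB : List String) (acc : List (List String)),
      (∀ n ∈ l, n ∈ pvNodes ps) →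
      vA.Nodup → vB.Nodup → (∀ y, y ∈ vA ↔ y ∈ vB) → pvClosed ps vA →
      (l.foldl (fun (st : PySem.Set String × List (List String)) node =>
          if PySem.Set.contains st.1 node then st
          else
            let r := pvDfs (pvGraph ps) ((2 * ps.length + 1) * (2 * ps.length + 1)) [node]
              st.1 PySem.Set.empty
            (r.1, st.2 ++ [PySem.List.sorted r.2 (fun x => x) false])) (vA, acc)).2 =
      (l.foldl (fun (st : PySem.Set String × List (List String)) node =>
          if PySem.Set.contains st.1 node then st
          else
            let comp := pvClose ps (2 * ps.length + 1)
              (PySem.Set.add PySem.Set.empty node)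
            (PySem.Set.union st.1 comp,
              st.2 ++ [PySem.List.sorted comp (fun x => x) false])) (vB, acc)).2 := by
  intro l
  induction l with
  | nil => intro vA vB acc _ _ _ _ _; rfl
  | cons node t ih =>
    intro vA vB acc hl hAn hBn hAB hAc
    have hl' : ∀ n ∈ t, n ∈ pvNodes ps := fun n hn => hl n (List.mem_cons_of_mem _ hn)
    have hnode : node ∈ pvNodes ps := hl node (List.mem_cons_self)
    simp only [List.foldl_cons]
    by_cases hmem : node ∈ vA
    · have hA : PySem.Set.contains vA node = true := (PySem.Set.contains_iff vA node).mpr hmem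
      have hB : PySem.Set.contains vB node = true :=
        (PySem.Set.contains_iff vB node).mpr ((hAB node).mp hmem)
      rw [if_pos hA, if_pos hB]
      exact ih vA vB acc hl' hAn hBn hAB hAc
    · have hmemB : node ∉ vB := fun h => hmem ((hAB node).mpr h)
      have hA : PySem.Set.contains vA node = false := by
        cases h : PySem.Set.contains vA node
        · rfl
        · exact absurd ((PySem.Set.contains_iff vA node).mp h) hmem
      have hB : PySem.Set.contains vB node = false := by
        cases h : PySem.Set.contains vB node
        · rfl
        · exact absurd ((PySem.Set.contains_iff vB node).mp h) hmemB
      rw [if_neg (by simp [hmem]), if_neg (by simp [hmemB])]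
      -- the DFS result
      have hfuelF : ((pvGraph ps).keys.filter (fun k => decide (k ∉ vA))).length ≤
          2 * ps.length := by
        calc ((pvGraph ps).keys.filter (fun k => decide (k ∉ vA))).length
            ≤ (pvGraph ps).keys.length := List.length_filter_le _ _
          _ = (pvNodes ps).length := by rw [pvGraph_keys]
          _ ≤ 2 * ps.length := pvNodes_length ps
      have hfuel : ([node] : List String).length +
          ((pvGraph ps).keys.filter (fun k => decide (k ∉ vA))).length *
            (2 * ps.length + 1) ≤ (2 * ps.length + 1) * (2 * ps.length + 1) := by
        have h1 : ((pvGraph ps).keys.filter (fun k => decide (k ∉ vA))).length *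
            (2 * ps.length + 1) ≤ (2 * ps.length) * (2 * ps.length + 1) :=
          Nat.mul_le_mul_right _ hfuelF
        have h2 : (2 * ps.length + 1) * (2 * ps.length + 1) =
            (2 * ps.length) * (2 * ps.length + 1) + (2 * ps.length + 1) := by ring
        simp only [List.length_cons, List.length_nil]
        omega
      obtain ⟨hd1, hd2, hd3, hd4⟩ := pvDfs_spec ps vA node hAc hmem hnode
        ((2 * ps.length + 1) * (2 * ps.length + 1)) [node] vA PySem.Set.empty
        hAn List.nodup_nil
        (by intro y; simp [PySem.Set.empty])
        (fun y hy => hy)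
        (by intro y hy; rcases List.mem_singleton.mp hy with rfl; exact Relation.ReflTransGen.refl)
        (by intro y hy; exact absurd hy (List.not_mem_nil))
        (by intro x hx; exact absurd hx (List.not_mem_nil))
        (Or.inr (List.mem_singleton.mpr rfl))
        hfuel
      obtain ⟨hc1, hc2⟩ := pvClose_comp ps node hnode
      set rA := pvDfs (pvGraph ps) ((2 * ps.length + 1) * (2 * ps.length + 1)) [node]
        vA PySem.Set.empty with hrA
      set comp := pvClose ps (2 * ps.length + 1) (PySem.Set.add PySem.Set.empty node)
        with hcomp
      have hsorted : PySem.List.sorted rA.2 (fun x => x) false =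
          PySem.List.sorted comp (fun x => x) false :=
        pv_sorted_eq_of_same_mem hd4 hc2 (fun y => (hd1 y).trans (hc1 y).symm)
      rw [hsorted]
      apply ih rA.1 (PySem.Set.union vB comp) (acc ++ [PySem.List.sorted comp (fun x => x) false])
        hl' hd3 (PySem.Set.nodup_union vB comp hBn)
      · intro y
        rw [hd2 y, PySem.Set.mem_union]
        constructor
        · rintro (hy | hy)
          · exact Or.inl ((hAB y).mp hy)
          · exact Or.inr ((hc1 y).mpr ((hd1 y).mp hy))
        · rintro (hy | hy)
          · exact Or.inl ((hAB y).mpr hy)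
          · exact Or.inr ((hd1 y).mpr ((hc1 y).mp hy))
      · intro x hx y hadj
        rcases (hd2 x).mp hx with hxA | hxg
        · exact (hd2 y).mpr (Or.inl (hAc x hxA y hadj))
        · have hconn : pvConn ps node y := ((hd1 x).mp hxg).tail hadj
          exact (hd2 y).mpr (Or.inr ((hd1 y).mpr hconn))

-- ===== VERDICT (by name: the statement is the Claim_ definition above) =====
theorem merge_overlapping_tuples_spec : Claim_equal_merge_overlapping_tuples := by
  intro pair_list _
  show merge_overlapping_tuples pair_list = merge_overlapping_tuples_alt pair_list
  unfold merge_overlapping_tuples merge_overlapping_tuples_alt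
  simp only []
  rw [pvGraph_keys]
  exact pv_outer pair_list (pvNodes pair_list) [] [] []
    (fun n hn => hn) List.nodup_nil List.nodup_nil (fun y => Iff.rfl)
    (fun x hx => absurd hx (List.not_mem_nil))
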